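-- pv_equiv track=rewrite | github.com/pymondo/pycharm | WorkOuts/Programs.py | form_new_array
-- ===== SOURCE A (Python) =====
-- def form_new_array(array, new_item):
--     new_array = []
--
--     for index, c in enumerate(array):
--         if c < new_item:
--             new_array.append(c)
--         else:
--             new_array.append(new_item)
--             new_array.extend(array[index:])
--             break
--     if new_item not in new_array:
--         new_array.append(new_item)
--     return new_array
-- ===== SOURCE B (Python) =====
-- def form_new_array(array, new_item):
--     # Divide and conquer: split the list in half; if the whole left half is
--     # < new_item the insertion point lies in the right half, otherwise in the
--     # left half; recurse on that half and glue the other half back unchanged.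
--     if not array:
--         return [new_item]
--     if len(array) == 1:
--         return [array[0], new_item] if array[0] < new_item else [new_item, array[0]]
--     mid = len(array) // 2
--     left, right = array[:mid], array[mid:]
--     if all(c < new_item for c in left):
--         return list(left) + form_new_array(right, new_item)
--     return form_new_array(left, new_item) + list(right)
-- ===== Notes on version B (the rewrite author's own statement) =====
-- stated objective: alternative
-- what changed: B replaces A's single left-to-right loop with break and membership re-scan by a divide-and-conquer recursion: split the list in half, decide which half contains the insertion point by checking the left half, and recurse on that half only.
import Mathlib
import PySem

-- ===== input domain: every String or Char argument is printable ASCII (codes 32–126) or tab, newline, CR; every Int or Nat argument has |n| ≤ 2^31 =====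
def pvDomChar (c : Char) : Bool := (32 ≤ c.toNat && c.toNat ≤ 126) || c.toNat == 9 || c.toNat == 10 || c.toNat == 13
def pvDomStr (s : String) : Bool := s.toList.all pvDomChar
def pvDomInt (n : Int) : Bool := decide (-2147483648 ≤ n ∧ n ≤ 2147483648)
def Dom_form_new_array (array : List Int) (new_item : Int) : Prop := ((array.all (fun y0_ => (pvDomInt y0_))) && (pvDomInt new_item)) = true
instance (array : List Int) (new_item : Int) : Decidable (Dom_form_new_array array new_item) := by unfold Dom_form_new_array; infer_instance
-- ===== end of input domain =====

-- B replaces A's loop-with-break and membership re-scan by a divide-and-conquer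
-- recursion on list halves (objective: alternative, not claimed faster).


-- ===== PORT A =====
-- the for-loop: acc is new_array, the second list is the remaining suffix of array;
-- on `break` we return acc ++ new_item :: (current suffix) (append + extend array[index:])
def form_new_array_loop (new_item : Int) (acc : List Int) : List Int → List Int
  | [] => acc
  | c :: rest =>
    if c < new_item then form_new_array_loop new_item (acc ++ [c]) rest
    else acc ++ new_item :: c :: rest

def form_new_array (array : List Int) (new_item : Int) : List Int :=
  let new_array := form_new_array_loop new_item [] array
  if new_item ∈ new_array then new_array else new_array ++ [new_item]

-- ===== PORT B =====
-- divide and conquer: check the left half to decide which half gets the insertion, recurse there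
def form_new_array_alt (array : List Int) (new_item : Int) : List Int :=
  match array with
  | [] => [new_item]
  | [c] => if c < new_item then [c, new_item] else [new_item, c]
  | c1 :: c2 :: rest =>
    let l := c1 :: c2 :: rest
    let mid := l.length / 2
    let left := l.take mid
    let right := l.drop mid
    if left.all (fun c => decide (c < new_item)) then left ++ form_new_array_alt right new_item
    else form_new_array_alt left new_item ++ right
termination_by array.length
decreasing_by
  · simp; omega
  · simp; omega

-- ===== PRECONDITION & SPEC =====
def Spec_form_new_array (array : List Int) (new_item : Int) (out : List Int) : Prop := out = form_new_array_alt array new_item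
instance (array : List Int) (new_item : Int) (out : List Int) : Decidable (Spec_form_new_array array new_item out) := by unfold Spec_form_new_array; infer_instance

-- ===== CLAIM (what is proved, stated in full; the proofs are below) =====
def Claim_equal_form_new_array : Prop := ∀ (array : List Int) (new_item : Int), Dom_form_new_array array new_item → Spec_form_new_array array new_item (form_new_array array new_item)

-- ===== LEMMAS AND PROOFS =====

-- the canonical value both programs compute: the all-< prefix, new_item, the rest
def fna_canon (l : List Int) (n : Int) : List Int :=
  l.takeWhile (fun c => decide (c < n)) ++ n :: l.dropWhile (fun c => decide (c < n))

-- the loop's accumulator only ever receives elements at the front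
theorem fna_loop_acc (new_item : Int) (l acc : List Int) :
    form_new_array_loop new_item acc l = acc ++ form_new_array_loop new_item [] l := by
  induction l generalizing acc with
  | nil => simp [form_new_array_loop]
  | cons c rest ih =>
    simp only [form_new_array_loop]
    split_ifs with hc
    · rw [ih, ih ([] ++ [c])]; simp
    · simp

theorem fna_a_eq_canon (array : List Int) (new_item : Int) :
    form_new_array array new_item = fna_canon array new_item := by
  induction array with
  | nil => simp [form_new_array, form_new_array_loop, fna_canon]
  | cons c rest ih =>
    unfold form_new_array
    simp only [form_new_array_loop]
    split_ifs with hc hm hm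
    · -- c < new_item and new_item found in the loop output
      rw [fna_loop_acc] at hm ⊢
      have hne : new_item ≠ c := by intro h; omega
      have hm' : new_item ∈ form_new_array_loop new_item [] rest := by
        rcases List.mem_append.mp hm with h | h
        · exact absurd (List.mem_singleton.mp h) hne
        · exact h
      have h2 : form_new_array rest new_item = form_new_array_loop new_item [] rest := by
        unfold form_new_array; simp [if_pos hm']
      rw [← h2, ih]
      simp [fna_canon, List.takeWhile, List.dropWhile, hc]
    · rw [fna_loop_acc] at hm ⊢
      have hm' : new_item ∉ form_new_array_loop new_item [] rest := by
        intro h; exact hm (List.mem_append.mpr (Or.inr h))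
      have h2 : form_new_array rest new_item = form_new_array_loop new_item [] rest ++ [new_item] := by
        unfold form_new_array; simp [if_neg hm']
      simp only [List.nil_append, List.cons_append, List.append_assoc]
      rw [← h2, ih]
      simp [fna_canon, List.takeWhile, List.dropWhile, hc]
    · simp [fna_canon, List.takeWhile, List.dropWhile, hc]
    · exact absurd (by simp) hm

-- splitting lemmas for the canonical form
theorem fna_canon_append_all (l1 l2 : List Int) (n : Int)
    (h : ∀ x ∈ l1, x < n) : fna_canon (l1 ++ l2) n = l1 ++ fna_canon l2 n := by
  induction l1 with
  | nil => simp
  | cons c rest ih =>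
    have hc : c < n := h c (List.mem_cons_self ..)
    simp only [fna_canon, List.cons_append, List.takeWhile, List.dropWhile, decide_eq_true hc] at *
    simp [ih (fun x hx => h x (List.mem_cons_of_mem _ hx)), fna_canon]

theorem fna_canon_append_exists (l1 l2 : List Int) (n : Int)
    (h : ∃ x ∈ l1, ¬ x < n) : fna_canon (l1 ++ l2) n = fna_canon l1 n ++ l2 := by
  induction l1 with
  | nil => rcases h with ⟨x, hx, _⟩; cases hx
  | cons c rest ih =>
    by_cases hc : c < n
    · have h' : ∃ x ∈ rest, ¬ x < n := by
        rcases h with ⟨x, hx, hxn⟩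
        cases hx with
        | head => exact absurd hc hxn
        | tail _ hm => exact ⟨x, hm, hxn⟩
      simp only [fna_canon, List.cons_append, List.takeWhile, List.dropWhile,
        decide_eq_true hc] at *
      simp [ih h']
    · simp [fna_canon, List.takeWhile, List.dropWhile, hc]

theorem fna_alt_eq_canon (array : List Int) (new_item : Int) :
    form_new_array_alt array new_item = fna_canon array new_item := by
  fun_induction form_new_array_alt array new_item with
  | case1 => simp [fna_canon]
  | case2 c hc => simp [fna_canon, List.takeWhile, List.dropWhile, hc]
  | case3 c hc => simp [fna_canon, List.takeWhile, List.dropWhile, hc]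
  | case4 c1 c2 rest l mid left right hall ih =>
    rw [ih]
    have h := fna_canon_append_all left right new_item
      (by intro x hx; simpa using List.all_eq_true.mp hall x hx)
    have hlr : left ++ right = l := List.take_append_drop ..
    rw [hlr] at h
    exact h.symm
  | case5 c1 c2 rest l mid left right hall ih =>
    rw [ih]
    have h := fna_canon_append_exists left right new_item
      (by
        have h0 : ¬ (left.all (fun c => decide (c < new_item)) = true) := hall
        simp only [List.all_eq_true, not_forall] at h0
        rcases h0 with ⟨x, hx, hxn⟩
        exact ⟨x, hx, by simpa using hxn⟩)
    have hlr : left ++ right = l := List.take_append_drop ..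
    rw [hlr] at h
    exact h.symm

-- ===== VERDICT (by name: the statement is the Claim_ definition above) =====
theorem form_new_array_spec : Claim_equal_form_new_array := by
  intro array new_item _
  unfold Spec_form_new_array
  rw [fna_a_eq_canon, fna_alt_eq_canon]
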